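-- pv_equiv track=rewrite | github.com/luoziyan100/paper-research | paper_research/workflow.py | _paper_title
-- ===== SOURCE A (Python) =====
-- def _paper_title(text: str) -> str:
--     for line in text.splitlines():
--         line = line.strip()
--         if line.lower().startswith("title:"):
--             return line.split(":", 1)[1].strip()
--     for line in text.splitlines():
--         line = line.strip()
--         if line:
--             return line[:120]
--     return ""
-- ===== SOURCE B (Python) =====
-- def _paper_title(text: str) -> str:
--     fallback = None
--     for raw in text.splitlines():
--         line = raw.strip()
--         if line.lower().startswith("title:"):
--             return line.split(":", 1)[1].strip()
--         if fallback is None and line: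
--             fallback = line[:120]
--     return fallback if fallback is not None else ""
-- ===== Notes on version B (the rewrite author's own statement) =====
-- stated objective: simpler
-- what changed: Replaces A's two sequential scans of text.splitlines() with a single pass that keeps an Option fallback accumulator (first non-empty stripped line, truncated) and returns a title line immediately.
import Mathlib
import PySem

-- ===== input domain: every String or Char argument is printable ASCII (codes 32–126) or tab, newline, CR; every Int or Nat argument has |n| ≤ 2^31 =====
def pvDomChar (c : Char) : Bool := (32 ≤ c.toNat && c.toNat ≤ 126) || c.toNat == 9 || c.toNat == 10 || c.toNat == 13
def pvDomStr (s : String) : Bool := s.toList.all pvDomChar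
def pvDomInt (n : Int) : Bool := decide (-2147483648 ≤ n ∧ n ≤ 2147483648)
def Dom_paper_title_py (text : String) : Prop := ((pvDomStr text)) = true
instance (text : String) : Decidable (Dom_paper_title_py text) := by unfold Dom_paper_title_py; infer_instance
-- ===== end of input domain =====

-- B merges A's two sequential scans over splitlines into one pass with an Option fallback accumulator (simpler, single pass).

-- ===== PORT A =====
-- first loop of A: return first stripped line with a "title:" prefix, extracted and stripped
-- (index [1] of split(":",1) always exists there since the line contains ':'; getD "" is unreachable)
def pvALoop1 : List String → Option String
  | [] => none
  | l :: ls =>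
    let line := PySem.Str.strip l
    if PySem.Str.startswith (PySem.Str.lower line) "title:" = true then
      some (PySem.Str.strip (((PySem.Str.splitMax? line ":" 1).getD [])[1]?.getD ""))
    else pvALoop1 ls

-- second loop of A: first non-empty stripped line, truncated to 120 chars
def pvALoop2 : List String → Option String
  | [] => none
  | l :: ls =>
    let line := PySem.Str.strip l
    if line ≠ "" then some (PySem.Str.slice line none (some 120))
    else pvALoop2 ls

def paper_title_py (text : String) : String :=
  match pvALoop1 (PySem.Str.splitlines text) with
  | some t => t
  | none =>
    match pvALoop2 (PySem.Str.splitlines text) with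
    | some t => t
    | none => ""

-- ===== PORT B =====
-- single pass with a fallback accumulator (port of Source B's loop)
def pvBLoop : List String → Option String → String
  | [], fb => fb.getD ""
  | raw :: ls, fb =>
    let line := PySem.Str.strip raw
    if PySem.Str.startswith (PySem.Str.lower line) "title:" = true then
      PySem.Str.strip (((PySem.Str.splitMax? line ":" 1).getD [])[1]?.getD "")
    else if fb.isNone ∧ line ≠ "" then
      pvBLoop ls (some (PySem.Str.slice line none (some 120)))
    else pvBLoop ls fb

def paper_title_py_alt (text : String) : String :=
  pvBLoop (PySem.Str.splitlines text) none

-- ===== PRECONDITION & SPEC =====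
def Spec_paper_title_py (text : String) (out : String) : Prop := out = paper_title_py_alt text
instance (text : String) (out : String) : Decidable (Spec_paper_title_py text out) := by unfold Spec_paper_title_py; infer_instance

-- ===== CLAIM (what is proved, stated in full; the proofs are below) =====
def Claim_equal_paper_title_py : Prop := ∀ (text : String), Dom_paper_title_py text → Spec_paper_title_py text (paper_title_py text)

-- ===== LEMMAS AND PROOFS =====

-- loop invariant: the single pass equals "loop1, else the fallback, else loop2"
theorem pvBLoop_eq (ls : List String) (fb : Option String) :
    pvBLoop ls fb = (pvALoop1 ls).getD (fb.getD ((pvALoop2 ls).getD "")) := by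
  induction ls generalizing fb with
  | nil => cases fb <;> simp [pvBLoop, pvALoop1, pvALoop2]
  | cons l ls ih =>
    simp only [pvBLoop, pvALoop1, pvALoop2]
    by_cases h1 : PySem.Str.startswith (PySem.Str.lower (PySem.Str.strip l)) "title:" = true
    · rw [if_pos h1, if_pos h1]
      simp
    · rw [if_neg h1, if_neg h1]
      by_cases hne : PySem.Str.strip l = ""
      · rw [if_neg (fun h => h.2 hne), if_neg (fun h => h hne)]
        exact ih fb
      · cases fb with
        | some f =>
          rw [if_neg (fun h => by simpa using h.1)]
          rw [ih]
          simp
        | none =>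
          rw [if_pos ⟨rfl, hne⟩, if_pos hne]
          rw [ih]
          simp
-- ===== VERDICT (by name: the statement is the Claim_ definition above) =====
theorem paper_title_py_spec : Claim_equal_paper_title_py := by
  intro text _
  unfold Spec_paper_title_py paper_title_py paper_title_py_alt
  rw [pvBLoop_eq]
  cases h1 : pvALoop1 (PySem.Str.splitlines text) with
  | some t => simp
  | none =>
    cases h2 : pvALoop2 (PySem.Str.splitlines text) <;> simp
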